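-- pv_equiv track=rewrite | github.com/Unicyde/Flat | src/utils.py | splitByNewline
-- ===== SOURCE A (Python) =====
-- def splitByNewline(string):
--     toks = []
--     line = ""
--     esc = False
--     s = False
--     for c in string:
--         if c == "\"":
--             if not esc:
--                 s = not s
--             else:
--                 esc = False
--         elif c == "\\":
--             esc = not esc
--         elif c == "\n" and not s:
--             toks.append(line)
--             line = ""
--             continue
--         line += c
--     if line != "":
--         toks.append(line)
--     return toks
-- ===== SOURCE B (Python) =====
-- def splitByNewline(string):
--     pieces = string.split("\n")
--     in_quote = False
--     esc = False
--
--     def scan(piece):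
--         nonlocal in_quote, esc
--         for c in piece:
--             if c == "\"":
--                 if esc:
--                     esc = False
--                 else:
--                     in_quote = not in_quote
--             elif c == "\\":
--                 esc = not esc
--
--     result = []
--     current = pieces[0]
--     scan(current)
--     for piece in pieces[1:]:
--         if in_quote:
--             current = current + "\n" + piece
--         else:
--             result.append(current)
--             current = piece
--         scan(piece)
--     result.append(current)
--     if result[-1] == "":
--         result.pop()
--     return result
-- ===== Notes on version B (the rewrite author's own statement) =====
-- stated objective: alternative
-- what changed: A scans the string one character at a time, building each token incrementally and deciding at every character whether it is an unquoted newline; B first splits the whole string on the newline character and then walks the resulting pieces, re-joining a piece to the current token when the quote flag is open at the boundary and dropping a single trailing empty token at the end.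
import Mathlib
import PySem

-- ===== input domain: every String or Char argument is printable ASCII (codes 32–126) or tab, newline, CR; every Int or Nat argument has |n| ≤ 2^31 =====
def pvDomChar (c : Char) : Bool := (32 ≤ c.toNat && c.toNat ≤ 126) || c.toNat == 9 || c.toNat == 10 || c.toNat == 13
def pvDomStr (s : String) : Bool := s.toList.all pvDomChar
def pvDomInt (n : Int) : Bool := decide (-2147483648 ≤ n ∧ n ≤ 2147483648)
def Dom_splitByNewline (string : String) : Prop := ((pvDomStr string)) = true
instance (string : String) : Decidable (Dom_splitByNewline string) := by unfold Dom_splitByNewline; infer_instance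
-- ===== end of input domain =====

-- B replaces A's single char-by-char loop by splitting on '\n' first and then walking the
-- pieces, carrying the quote/escape flags across the piece boundaries (objective: alternative).

-- ===== PORT A =====
-- one character of A's loop; state (toks, line, esc, s) exactly as in the Python
def pvStepA (st : List (List Char) × List Char × Bool × Bool) (c : Char) :
    List (List Char) × List Char × Bool × Bool :=
  match st with
  | (toks, line, esc, s) =>
    if c = '"' then
      if esc = false then (toks, line ++ [c], esc, !s)
      else (toks, line ++ [c], false, s)
    else if c = '\\' then (toks, line ++ [c], !esc, s)
    else if c = '\n' ∧ s = false then (toks ++ [line], [], esc, s)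
    else (toks, line ++ [c], esc, s)

def splitByNewline (string : String) : List String :=
  match string.toList.foldl pvStepA ([], [], false, false) with
  | (toks, line, _, _) =>
    (if line ≠ [] then toks ++ [line] else toks).map String.ofList

-- ===== PORT B =====
-- flag update for one char of a (newline-free) piece; state (in_quote, esc)
def pvStepS (st : Bool × Bool) (c : Char) : Bool × Bool :=
  match st with
  | (q, e) =>
    if c = '"' then (if e then (q, false) else (!q, e))
    else if c = '\\' then (q, !e)
    else (q, e)

def pvScan (st : Bool × Bool) (piece : List Char) : Bool × Bool :=
  piece.foldl pvStepS st

-- one boundary + one piece of B's loop; state (result, current, in_quote, esc)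
def pvStepB (acc : List (List Char) × List Char × Bool × Bool) (piece : List Char) :
    List (List Char) × List Char × Bool × Bool :=
  match acc with
  | (res, cur, q, e) =>
    let rc := if q then (res, cur ++ '\n' :: piece) else (res ++ [cur], piece)
    let qe := pvScan (q, e) piece
    (rc.1, rc.2, qe.1, qe.2)

def splitByNewline_alt (string : String) : List String :=
  let pieces := PySem.Chars.splitOn string.toList ['\n']
  let cur0 := pieces.headD []
  let st0 := pvScan (false, false) cur0
  match (pieces.drop 1).foldl pvStepB ([], cur0, st0.1, st0.2) with
  | (res, cur, _, _) =>
    let res2 := res ++ [cur]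
    (if res2.getLast? = some [] then res2.dropLast else res2).map String.ofList

-- ===== PRECONDITION & SPEC =====
def Spec_splitByNewline (string : String) (out : List String) : Prop := out = splitByNewline_alt string
instance (string : String) (out : List String) : Decidable (Spec_splitByNewline string out) := by unfold Spec_splitByNewline; infer_instance

-- ===== CLAIM (what is proved, stated in full; the proofs are below) =====
def Claim_equal_splitByNewline : Prop := ∀ (string : String), Dom_splitByNewline string → Spec_splitByNewline string (splitByNewline string)

-- ===== LEMMAS AND PROOFS =====

-- PySem's fuel-based splitOn, for the one-char separator '\n', is Mathlib's List.splitOn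
theorem pvSplitOn_go_eq (l : List Char) (fuel : Nat) (cur : List Char) (acc : List (List Char))
    (h : l.length < fuel) :
    PySem.Chars.splitOn.go ['\n'] fuel l cur acc
      = acc.reverse ++ (l.splitOn '\n').modifyHead (cur.reverse ++ ·) := by
  induction l generalizing fuel cur acc with
  | nil =>
    cases fuel with
    | zero => omega
    | succ f => simp [PySem.Chars.splitOn.go, List.splitOn]
  | cons c rest ih =>
    cases fuel with
    | zero => omega
    | succ f =>
      rw [PySem.Chars.splitOn.go]
      by_cases hc : c = '\n'
      · subst hc
        simp only [List.isPrefixOf, BEq.rfl, Bool.true_and, if_true]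
        rw [show List.drop (['\n'].length) ('\n' :: rest) = rest from rfl]
        rw [ih _ [] _ (by simpa using h)]
        simp [List.splitOn, List.splitOnP_cons]
        rw [show (fun x : List Char => x) = id from rfl, List.modifyHead_id]
        rfl
      · have hpc : ('\n' == c) = false := beq_eq_false_iff_ne.mpr (fun he => hc he.symm)
        simp only [List.isPrefixOf, hpc, Bool.false_and, Bool.false_eq_true, if_false]
        rw [ih _ (c :: cur) _ (by simpa using h)]
        have hcp : (c == '\n') = false := beq_eq_false_iff_ne.mpr hc
        simp [List.splitOn, List.splitOnP_cons, hcp, List.modifyHead_modifyHead,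
          Function.comp_def]

theorem pvSplitOn_eq (cs : List Char) :
    PySem.Chars.splitOn cs ['\n'] = cs.splitOn '\n' := by
  rw [PySem.Chars.splitOn, pvSplitOn_go_eq cs (cs.length + 1) [] [] (by omega)]
  simp
  rw [show (fun x : List Char => x) = id from rfl, List.modifyHead_id]
  rfl

-- every piece produced by splitOnP is free of separator characters
theorem pv_notP_of_mem_splitOnP {α : Type} (p : α → Bool) (xs piece : List α)
    (hm : piece ∈ xs.splitOnP p) : ∀ a ∈ piece, p a = false := by
  induction xs generalizing piece with
  | nil =>
    simp only [List.splitOnP_nil, List.mem_singleton] at hm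
    subst hm; intro a ha; cases ha
  | cons x xs ih =>
    rw [List.splitOnP_cons] at hm
    by_cases hx : p x
    · rw [if_pos hx] at hm
      rcases List.mem_cons.mp hm with h | h
      · subst h; intro a ha; cases ha
      · exact ih piece h
    · rw [if_neg hx] at hm
      obtain ⟨hd, tl, he⟩ := List.exists_cons_of_ne_nil (List.splitOnP_ne_nil p xs)
      rw [he, List.modifyHead_cons] at hm
      rcases List.mem_cons.mp hm with h | h
      · subst h
        intro a ha
        rcases List.mem_cons.mp ha with rfl | ha
        · exact eq_false_of_ne_true hx
        · exact ih hd (he ▸ List.mem_cons_self) a ha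
      · exact ih piece (he ▸ List.mem_cons_of_mem _ h)

theorem pv_intercalate_cons {α : Type} (x : α) (a : List α) (l : List (List α)) :
    [x].intercalate (a :: l) = a ++ (l.map (x :: ·)).flatten := by
  induction l generalizing a with
  | nil => simp [List.intercalate]
  | cons b l ih =>
    simp only [List.intercalate, List.intersperse_cons₂, List.flatten_cons] at *
    congr 1
    rw [ih b]
    simp

-- A's fold over a newline-free chunk appends the chunk to line and updates the flags with pvScan
theorem pvFoldA_no_newline (cs : List Char) (toks : List (List Char)) (line : List Char)
    (esc s : Bool) (h : '\n' ∉ cs) :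
    cs.foldl pvStepA (toks, line, esc, s)
      = (toks, line ++ cs, (pvScan (s, esc) cs).2, (pvScan (s, esc) cs).1) := by
  induction cs generalizing line esc s with
  | nil => simp [pvScan]
  | cons c cs ih =>
    have hc : c ≠ '\n' := fun he => h (he ▸ List.mem_cons_self)
    have h' : '\n' ∉ cs := fun hm => h (List.mem_cons_of_mem _ hm)
    simp only [List.foldl_cons]
    rw [show pvScan (s, esc) (c :: cs) = pvScan (pvStepS (s, esc) c) cs from rfl]
    by_cases h1 : c = '"'
    · subst h1
      by_cases h2 : esc = false
      · subst h2
        rw [show pvStepA (toks, line, false, s) '"' = (toks, line ++ ['"'], false, !s) from by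
          simp [pvStepA]]
        rw [ih _ _ _ h']
        simp [pvStepS]
      · have h2' : esc = true := by revert h2; cases esc <;> simp
        subst h2'
        rw [show pvStepA (toks, line, true, s) '"' = (toks, line ++ ['"'], false, s) from by
          simp [pvStepA]]
        rw [ih _ _ _ h']
        simp [pvStepS]
    · by_cases h3 : c = '\\'
      · subst h3
        rw [show pvStepA (toks, line, esc, s) '\\' = (toks, line ++ ['\\'], !esc, s) from by
          simp [pvStepA]]
        rw [ih _ _ _ h']
        simp [pvStepS]
      · rw [show pvStepA (toks, line, esc, s) c = (toks, line ++ [c], esc, s) from by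
          simp [pvStepA, h1, h3, hc]]
        rw [ih _ _ _ h']
        simp [pvStepS, h1, h3]

-- A's fold over the remaining '\n'-prefixed pieces is B's fold over the pieces
theorem pvFoldA_pieces (rest : List (List Char)) (res : List (List Char)) (cur : List Char)
    (q e : Bool) (h : ∀ p ∈ rest, '\n' ∉ p) :
    ((rest.map (fun p => '\n' :: p)).flatten).foldl pvStepA (res, cur, e, q)
      = (match rest.foldl pvStepB (res, cur, q, e) with
         | (res', cur', q', e') => (res', cur', e', q')) := by
  induction rest generalizing res cur q e with
  | nil => simp
  | cons p rest ih =>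
    have hp : '\n' ∉ p := h p List.mem_cons_self
    have h' : ∀ x ∈ rest, '\n' ∉ x := fun x hx => h x (List.mem_cons_of_mem _ hx)
    simp only [List.map_cons, List.flatten_cons, List.foldl_append, List.foldl_cons]
    by_cases hq : q
    · subst hq
      rw [show pvStepA (res, cur, e, true) '\n' = (res, cur ++ ['\n'], e, true) from by
        simp [pvStepA]]
      rw [pvFoldA_no_newline p _ _ _ _ hp, ih _ _ _ _ h']
      rw [show pvStepB (res, cur, true, e) p
            = (res, cur ++ '\n' :: p, (pvScan (true, e) p).1, (pvScan (true, e) p).2) from by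
        simp [pvStepB]]
      rw [show cur ++ ['\n'] ++ p = cur ++ '\n' :: p from by simp]
    · have hq' : q = false := by revert hq; cases q <;> simp
      subst hq'
      rw [show pvStepA (res, cur, e, false) '\n' = (res ++ [cur], [], e, false) from by
        simp [pvStepA]]
      rw [pvFoldA_no_newline p _ _ _ _ hp, ih _ _ _ _ h']
      rw [show pvStepB (res, cur, false, e) p
            = (res ++ [cur], p, (pvScan (false, e) p).1, (pvScan (false, e) p).2) from by
        simp [pvStepB]]
      rw [show ([] : List Char) ++ p = p from by simp]

-- ===== VERDICT (by name: the statement is the Claim_ definition above) =====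
theorem splitByNewline_spec : Claim_equal_splitByNewline := by
  intro string _
  unfold Spec_splitByNewline splitByNewline splitByNewline_alt
  have hne : string.toList.splitOn '\n' ≠ [] := by
    rw [List.splitOn]; exact List.splitOnP_ne_nil _ _
  obtain ⟨p0, ps, hps⟩ := List.exists_cons_of_ne_nil hne
  have hnf : ∀ p ∈ string.toList.splitOn '\n', '\n' ∉ p := by
    intro p hp hmem
    have := pv_notP_of_mem_splitOnP (· == '\n') string.toList p
      (by rw [List.splitOn] at hp; exact hp) '\n' hmem
    simp at this
  have hre : string.toList = p0 ++ (ps.map (fun p => '\n' :: p)).flatten := by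
    have hi := List.intercalate_splitOn (xs := string.toList) '\n'
    rw [hps, pv_intercalate_cons] at hi
    exact hi.symm
  have hA : string.toList.foldl pvStepA ([], [], false, false)
      = (match ps.foldl pvStepB
            ([], p0, (pvScan (false, false) p0).1, (pvScan (false, false) p0).2) with
         | (res', cur', q', e') => (res', cur', e', q')) := by
    rw [hre, List.foldl_append]
    rw [pvFoldA_no_newline p0 [] [] false false (hnf p0 (hps ▸ List.mem_cons_self))]
    rw [show ([] : List Char) ++ p0 = p0 from by simp]
    exact pvFoldA_pieces ps [] p0 _ _
      (fun p hp => hnf p (hps ▸ List.mem_cons_of_mem _ hp))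
  rw [hA, pvSplitOn_eq, hps]
  simp only [List.headD_cons, List.drop_one, List.tail_cons]
  rcases hfold : ps.foldl pvStepB
      ([], p0, (pvScan (false, false) p0).1, (pvScan (false, false) p0).2)
    with ⟨res, cur, q2, e2⟩
  by_cases hcur : cur = []
  · subst hcur; simp
  · simp [hcur]
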